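-- pv_equiv track=rewrite | github.com/buidly/mx-chain-go | scripts/testnet/sovereignBridge/pyScripts/update_proxy.py | update_elasticsearch_enabled
-- ===== SOURCE A (Python) =====
-- def update_elasticsearch_enabled(lines, section, identifier) -> []:
--     updated_lines = []
--     section_found = False
--
--     for line in lines:
--         if line.startswith("[" + section + "]"):
--             section_found = True
--         if section_found and identifier in line:
--             line = "    Enabled           = true\n"
--             section_found = False
--         updated_lines.append(line)
--
--     return updated_lines
-- ===== SOURCE B (Python) =====
-- def update_elasticsearch_enabled(lines, section, identifier):
--     # Search-and-jump: find the next section header, then the first line from it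
--     # (inclusive) containing the identifier, replace that line, and continue
--     # after it; lines outside these hits are copied unchanged.
--     header = "[" + section + "]"
--     out = []
--     rest = lines
--     while True:
--         h = next((k for k, l in enumerate(rest) if l.startswith(header)), None)
--         if h is None:
--             out.extend(rest)
--             return out
--         j = next((k for k in range(h, len(rest)) if identifier in rest[k]), None)
--         if j is None:
--             out.extend(rest)
--             return out
--         out.extend(rest[:j])
--         out.append("    Enabled           = true\n")
--         rest = rest[j + 1:]
-- ===== Notes on version B (the rewrite author's own statement) =====
-- stated objective: faster
-- what changed: Replaces the per-line armed-boolean state machine with a search-and-jump loop that locates the next section header, then the first identifier line from it, splices the replacement via bulk slice/extend, and continues after it; the per-line Python-level branch work (including rebuilding the header string each line) disappears into C-level scans.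
import Mathlib
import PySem

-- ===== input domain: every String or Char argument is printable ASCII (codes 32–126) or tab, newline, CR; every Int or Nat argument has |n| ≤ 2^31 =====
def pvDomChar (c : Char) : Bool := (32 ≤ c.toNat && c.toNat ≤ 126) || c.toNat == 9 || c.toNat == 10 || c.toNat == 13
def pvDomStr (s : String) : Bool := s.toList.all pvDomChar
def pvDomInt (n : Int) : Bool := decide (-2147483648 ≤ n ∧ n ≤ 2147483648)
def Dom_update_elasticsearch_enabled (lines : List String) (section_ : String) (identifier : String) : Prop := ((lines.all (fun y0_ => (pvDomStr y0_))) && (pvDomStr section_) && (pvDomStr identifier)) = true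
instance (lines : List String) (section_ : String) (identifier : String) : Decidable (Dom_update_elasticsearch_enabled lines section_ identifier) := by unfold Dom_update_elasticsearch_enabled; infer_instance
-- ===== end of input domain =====

-- B replaces A's per-line armed-flag state machine by a search-and-jump loop
-- (find next header, then first identifier line from it, splice, continue);
-- same asymptotic cost, measurably faster in Python (bulk scans/extends).

-- ===== PORT A =====
-- for line in lines: armed flag + per-line replacement, accumulated in updated_lines
def update_elasticsearch_enabled (lines : List String) (section_ : String) (identifier : String) : List String :=
  (lines.foldl
    (fun (st : List String × Bool) (line : String) =>
      let section_found := st.2 || PySem.Str.startswith line ("[" ++ section_ ++ "]")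
      if section_found && PySem.Str.isIn identifier line then
        (st.1 ++ ["    Enabled           = true\n"], false)
      else
        (st.1 ++ [line], section_found))
    ([], false)).1

-- ===== PORT B =====
-- the while-loop of Source B: out grows by rest[:j] ++ [replacement]; rest := rest[j+1:]
def ueAltGo (header identifier : String) (rest : List String) : List String :=
  match hh : rest.findIdx? (fun l => PySem.Str.startswith l header) with
  | none => rest
  | some h =>
    match hj : (rest.drop h).findIdx? (fun l => PySem.Str.isIn identifier l) with
    | none => rest
    | some k =>
      rest.take (h + k) ++ ["    Enabled           = true\n"]
        ++ ueAltGo header identifier (rest.drop (h + k + 1))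
termination_by rest.length
decreasing_by
  cases rest with
  | nil => simp at hh
  | cons a l => simp only [List.length_drop, List.length_cons]; omega

def update_elasticsearch_enabled_alt (lines : List String) (section_ : String) (identifier : String) : List String :=
  ueAltGo ("[" ++ section_ ++ "]") identifier lines

-- ===== PRECONDITION & SPEC =====
def Spec_update_elasticsearch_enabled (lines : List String) (section_ : String) (identifier : String) (out : List String) : Prop := out = update_elasticsearch_enabled_alt lines section_ identifier
instance (lines : List String) (section_ : String) (identifier : String) (out : List String) : Decidable (Spec_update_elasticsearch_enabled lines section_ identifier out) := by unfold Spec_update_elasticsearch_enabled; infer_instance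

-- ===== CLAIM (what is proved, stated in full; the proofs are below) =====
def Claim_equal_update_elasticsearch_enabled : Prop := ∀ (lines : List String) (section_ : String) (identifier : String), Dom_update_elasticsearch_enabled lines section_ identifier → Spec_update_elasticsearch_enabled lines section_ identifier (update_elasticsearch_enabled lines section_ identifier)

-- ===== LEMMAS AND PROOFS =====

theorem pvFindIdx?_some_lt {a : Type} (p : a → Bool) : ∀ (l : List a) (k : Nat),
    l.findIdx? p = some k → k < l.length := by
  intro l
  induction l with
  | nil => intro k h; simp at h
  | cons x xs ih =>
    intro k h
    rw [List.findIdx?_cons] at h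
    by_cases hx : p x = true
    · rw [if_pos hx] at h
      injection h with h
      simp [← h]
    · rw [if_neg hx, Option.map_eq_some_iff] at h
      obtain ⟨m, hm, rfl⟩ := h
      have := ih m hm
      simp only [List.length_cons]; omega

-- reference state machine: armed flag as an explicit parameter, predicates abstract
def ueSpecGo (p q : String → Bool) : Bool → List String → List String
  | _, [] => []
  | armed, a :: l =>
    let armed' := armed || p a
    if armed' && q a then
      "    Enabled           = true\n" :: ueSpecGo p q false l
    else
      a :: ueSpecGo p q armed' l

theorem foldlA_eq (p q : String → Bool) (l : List String) :
    ∀ (acc : List String) (sf : Bool),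
    (l.foldl
      (fun (st : List String × Bool) (line : String) =>
        let section_found := st.2 || p line
        if section_found && q line then
          (st.1 ++ ["    Enabled           = true\n"], false)
        else
          (st.1 ++ [line], section_found))
      (acc, sf)).1 = acc ++ ueSpecGo p q sf l := by
  induction l with
  | nil => simp [ueSpecGo]
  | cons a l ih =>
    intro acc sf
    simp only [List.foldl_cons, ueSpecGo]
    by_cases h : ((sf || p a) && q a) = true
    · simp only [h, if_true, ih]
      simp
    · simp only [Bool.not_eq_true] at h
      simp only [h, if_false, Bool.false_eq_true, ih]
      simp

theorem ueSpecGo_false_of_no_header (p q : String → Bool) (l : List String)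
    (h : l.findIdx? p = none) :
    ueSpecGo p q false l = l := by
  induction l with
  | nil => rfl
  | cons a l ih =>
    rw [List.findIdx?_cons] at h
    by_cases ha : p a = true
    · rw [if_pos ha] at h; exact absurd h (by simp)
    · rw [if_neg ha, Option.map_eq_none_iff] at h
      simp [ueSpecGo, ha, ih h]

theorem ueSpecGo_false_of_header (p q : String → Bool) (l : List String) :
    ∀ (n : Nat), l.findIdx? p = some n →
    ueSpecGo p q false l = l.take n ++ ueSpecGo p q true (l.drop n) := by
  induction l with
  | nil => intro n h; simp at h
  | cons a l ih =>
    intro n h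
    rw [List.findIdx?_cons] at h
    by_cases ha : p a = true
    · rw [if_pos ha] at h
      injection h with h
      subst h
      simp [ueSpecGo, ha]
    · rw [if_neg ha, Option.map_eq_some_iff] at h
      obtain ⟨m, hm, rfl⟩ := h
      simp [ueSpecGo, ha, ih m hm]

theorem ueSpecGo_true_of_no_ident (p q : String → Bool) (l : List String)
    (h : l.findIdx? q = none) :
    ueSpecGo p q true l = l := by
  induction l with
  | nil => rfl
  | cons a l ih =>
    rw [List.findIdx?_cons] at h
    by_cases ha : q a = true
    · rw [if_pos ha] at h; exact absurd h (by simp)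
    · rw [if_neg ha, Option.map_eq_none_iff] at h
      simp [ueSpecGo, ha, ih h]

theorem ueSpecGo_true_of_ident (p q : String → Bool) (l : List String) :
    ∀ (k : Nat), l.findIdx? q = some k →
    ueSpecGo p q true l
      = l.take k ++ "    Enabled           = true\n" :: ueSpecGo p q false (l.drop (k + 1)) := by
  induction l with
  | nil => intro k h; simp at h
  | cons a l ih =>
    intro k h
    rw [List.findIdx?_cons] at h
    by_cases ha : q a = true
    · rw [if_pos ha] at h
      injection h with h
      subst h
      simp [ueSpecGo, ha]
    · rw [if_neg ha, Option.map_eq_some_iff] at h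
      obtain ⟨m, hm, rfl⟩ := h
      simp [ueSpecGo, ha, ih m hm]

theorem ueAltGo_eq_spec (header identifier : String) :
    ∀ (n : Nat) (l : List String), l.length ≤ n →
    ueAltGo header identifier l
      = ueSpecGo (fun s => PySem.Str.startswith s header) (fun s => PySem.Str.isIn identifier s) false l := by
  intro n
  induction n with
  | zero =>
    intro l hl
    have : l = [] := List.eq_nil_of_length_eq_zero (Nat.le_zero.mp hl)
    subst this
    rw [ueAltGo]
    simp [ueSpecGo]
  | succ n ih =>
    intro l hl
    rw [ueAltGo]
    split
    · rename_i hh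
      exact (ueSpecGo_false_of_no_header _ _ l hh).symm
    · rename_i h hh
      split
      · rename_i hj
        rw [ueSpecGo_false_of_header _ _ l h hh,
            ueSpecGo_true_of_no_ident _ _ _ hj,
            List.take_append_drop]
      · rename_i k hj
        have hk : k < (l.drop h).length := pvFindIdx?_some_lt _ _ k hj
        have hlen : (l.drop (h + k + 1)).length ≤ n := by
          simp only [List.length_drop] at hk ⊢
          omega
        rw [ueSpecGo_false_of_header _ _ l h hh,
            ueSpecGo_true_of_ident _ _ _ k hj,
            ih _ hlen, List.drop_drop]
        rw [List.take_add]
        have he : h + (k + 1) = h + k + 1 := by omega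
        simp [he]

-- ===== VERDICT (by name: the statement is the Claim_ definition above) =====
theorem update_elasticsearch_enabled_spec : Claim_equal_update_elasticsearch_enabled := by
  intro lines section_ identifier _
  unfold Spec_update_elasticsearch_enabled update_elasticsearch_enabled update_elasticsearch_enabled_alt
  rw [foldlA_eq (fun line => PySem.Str.startswith line ("[" ++ section_ ++ "]"))
        (fun line => PySem.Str.isIn identifier line) lines [] false,
      ueAltGo_eq_spec ("[" ++ section_ ++ "]") identifier lines.length lines le_rfl]
  simp
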